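-- pv_equiv track=rewrite | github.com/p69180/handygenome | handygenome/tools.py | printwidth_get_width_list
-- ===== SOURCE A (Python) =====
-- def printwidth_get_width_list(df):
--     '''
--     df: [
--     [line1_field1, line1_field2, ... ],
--     [line2_field1, line2_field2, ... ],
--     ...,
--     ]
--     '''
--     width_list = list()
--     for i in range(len(df[0])):
--         width_list.append(list())
--
--     for line in df:
--         for idx, field in enumerate(line):
--             width_list[idx].append(len(field))
--
--     for idx, e in enumerate(width_list):
--         width_list[idx] = max(e)
--
--     return width_list
-- ===== SOURCE B (Python) =====
-- def printwidth_get_width_list(df):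
--     '''
--     df: [
--     [line1_field1, line1_field2, ... ],
--     [line2_field1, line2_field2, ... ],
--     ...,
--     ]
--     '''
--     width_list = [0] * len(df[0])
--     for line in df:
--         for idx, field in enumerate(line):
--             width_list[idx] = max(width_list[idx], len(field))
--     return width_list
-- ===== Notes on version B (the rewrite author's own statement) =====
-- stated objective: simpler
-- what changed: Replaces the collect-then-reduce pipeline (a list of per-column length lists built in one pass, reduced by max in a separate final pass) with a single fused pass that keeps only one running maximum per column in a flat int list initialized to zeros.
import Mathlib
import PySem

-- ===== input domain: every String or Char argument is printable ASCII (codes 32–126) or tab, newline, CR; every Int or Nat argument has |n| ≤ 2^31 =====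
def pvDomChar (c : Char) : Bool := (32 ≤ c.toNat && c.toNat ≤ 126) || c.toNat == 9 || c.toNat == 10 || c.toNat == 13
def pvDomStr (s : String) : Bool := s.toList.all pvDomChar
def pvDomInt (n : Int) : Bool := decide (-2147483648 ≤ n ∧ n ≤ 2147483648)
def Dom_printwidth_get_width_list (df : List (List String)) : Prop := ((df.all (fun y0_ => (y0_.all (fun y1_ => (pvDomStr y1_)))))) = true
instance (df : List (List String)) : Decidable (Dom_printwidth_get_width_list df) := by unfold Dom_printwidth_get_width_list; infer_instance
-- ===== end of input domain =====

-- B fuses A's collect-then-reduce (per-column lists of lengths, reduced by max in a final pass)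
-- into one pass keeping a single running maximum per column; same value on every input where A returns.


-- ===== PORT A =====
-- width_list[idx].append(len(field)) for one (idx, field) pair of enumerate(line)
def pvStepA (w : List (List Int)) (p : Int × String) : List (List Int) :=
  PySem.List.pySetD w p.1 (PySem.List.pyGetD w p.1 [] ++ [PySem.Str.len p.2])

-- the inner 'for idx, field in enumerate(line)' loop
def pvRowA (w : List (List Int)) (line : List String) : List (List Int) :=
  (PySem.List.enumerate line).foldl pvStepA w

def printwidth_get_width_list (df : List (List String)) : List Int :=
  -- for i in range(len(df[0])): width_list.append(list())
  let w0 : List (List Int) :=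
    (PySem.List.pyRange 0 ((PySem.List.pyGetD df 0 []).length : Int) 1).foldl
      (fun acc _ => acc ++ [([] : List Int)]) []
  -- for line in df: for idx, field in enumerate(line): width_list[idx].append(len(field))
  let w1 := df.foldl pvRowA w0
  -- for idx, e in enumerate(width_list): width_list[idx] = max(e)
  -- (each element is read before its own slot is overwritten, so the loop is a map)
  w1.map (fun e => (PySem.List.max? e (fun y => y)).getD 0)

-- ===== PORT B =====
-- width_list[idx] = max(width_list[idx], len(field)) for one (idx, field) pair
def pvStepB (w : List Int) (p : Int × String) : List Int :=
  PySem.List.pySetD w p.1 (max (PySem.List.pyGetD w p.1 0) (PySem.Str.len p.2))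

def pvRowB (w : List Int) (line : List String) : List Int :=
  (PySem.List.enumerate line).foldl pvStepB w

def printwidth_get_width_list_alt (df : List (List String)) : List Int :=
  -- width_list = [0] * len(df[0])
  let w0 : List Int := PySem.List.pyRepeat [0] ((PySem.List.pyGetD df 0 []).length : Int)
  df.foldl pvRowB w0

-- ===== PRECONDITION & SPEC =====
-- Pre_ excludes exactly the inputs where the Python A raises IndexError: an empty df (indexing
-- its first row) and rows longer than the first row; B raises the same IndexError there.
def Pre_printwidth_get_width_list (df : List (List String)) : Prop :=
  df ≠ [] ∧ ∀ line ∈ df, line.length ≤ (df.headD []).length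
instance (df : List (List String)) : Decidable (Pre_printwidth_get_width_list df) := by
  unfold Pre_printwidth_get_width_list; infer_instance
def pvWitness_printwidth_get_width_list : List (List String) := [["ab", "c"], ["x", "def"]]

def Spec_printwidth_get_width_list (df : List (List String)) (out : List Int) : Prop := out = printwidth_get_width_list_alt df
instance (df : List (List String)) (out : List Int) : Decidable (Spec_printwidth_get_width_list df out) := by unfold Spec_printwidth_get_width_list; infer_instance

-- ===== CLAIM (what is proved, stated in full; the proofs are below) =====
def Claim_equal_printwidth_get_width_list : Prop := ∀ (df : List (List String)), Dom_printwidth_get_width_list df → Pre_printwidth_get_width_list df → Spec_printwidth_get_width_list df (printwidth_get_width_list df)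

-- ===== LEMMAS AND PROOFS =====

-- A's final reduction of one column: max(e) with Python's empty-guard defaulted to 0
def pvM (e : List Int) : Int := (PySem.List.max? e (fun y => y)).getD 0

theorem pvM_nil : pvM [] = 0 := rfl

theorem pvStrLen_nonneg (s : String) : 0 ≤ PySem.Str.len s := by
  simp [PySem.Str.len_eq]

theorem pvSetD_natCast {α : Type} (xs : List α) (n : Nat) (v : α) :
    PySem.List.pySetD xs (n : Int) v = xs.set n v := by
  simp only [PySem.List.pySetD, PySem.List.pySet?, PySem.List.pyIdx?]
  by_cases h : n < xs.length
  · simp [h]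
  · have hs : xs.set n v = xs := List.set_eq_of_length_le (by omega)
    simp [h, hs]

theorem pvM_append (e : List Int) (l : Int) (he : ∀ x ∈ e, 0 ≤ x) (hl : 0 ≤ l) :
    pvM (e ++ [l]) = max (pvM e) l := by
  cases e with
  | nil =>
    have h0 : ((PySem.List.max? ([] : List Int) (fun y => y)).getD 0) = 0 := rfl
    simp [pvM, PySem.List.max?_id_cons, h0]
    omega
  | cons x t => simp [pvM, PySem.List.max?_id_cons, List.foldl_append]

theorem pvGetD_nonneg (as : List (List Int)) (k : Nat)
    (h : ∀ e ∈ as, ∀ x ∈ e, 0 ≤ x) : ∀ x ∈ PySem.List.pyGetD as (k : Int) [], 0 ≤ x := by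
  rw [PySem.List.pyGetD_natCast]
  by_cases hk : k < as.length
  · rw [List.getD_eq_getElem _ _ hk]; exact h _ (List.getElem_mem hk)
  · rw [List.getD_eq_default _ _ (by omega)]; simp

-- one field: B's running-max update is A's append, seen through the column-max map pvM
theorem pvStep_comm (as : List (List Int)) (k : Nat) (f : String)
    (h : ∀ e ∈ as, ∀ x ∈ e, 0 ≤ x) :
    pvStepB (as.map pvM) ((k : Int), f) = (pvStepA as ((k : Int), f)).map pvM := by
  have hl := pvStrLen_nonneg f
  simp only [pvStepA, pvStepB, pvSetD_natCast, List.map_set]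
  have hget : PySem.List.pyGetD (as.map pvM) (k : Int) 0
      = pvM (PySem.List.pyGetD as (k : Int) []) := by
    have := PySem.List.pyGetD_map pvM as (k : Int) []
    rwa [pvM_nil] at this
  rw [hget, pvM_append _ _ (pvGetD_nonneg as k h) hl]

-- A's step only appends, so column nonnegativity is preserved
theorem pvStepA_nonneg (as : List (List Int)) (k : Nat) (f : String)
    (h : ∀ e ∈ as, ∀ x ∈ e, 0 ≤ x) :
    ∀ e ∈ pvStepA as ((k : Int), f), ∀ x ∈ e, 0 ≤ x := by
  intro e he x hx
  simp only [pvStepA, pvSetD_natCast] at he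
  rcases List.mem_or_eq_of_mem_set he with h' | h'
  · exact h e h' x hx
  · subst h'
    rcases List.mem_append.1 hx with h' | h'
    · exact pvGetD_nonneg as k h x h'
    · simp only [List.mem_singleton] at h'; subst h'; exact pvStrLen_nonneg f

-- one row, at any enumerate start offset
theorem pvRow_comm (line : List String) : ∀ (s : Nat) (as : List (List Int)),
    (∀ e ∈ as, ∀ x ∈ e, 0 ≤ x) →
    (PySem.List.enumerate line (s : Int)).foldl pvStepB (as.map pvM)
        = ((PySem.List.enumerate line (s : Int)).foldl pvStepA as).map pvM
      ∧ ∀ e ∈ (PySem.List.enumerate line (s : Int)).foldl pvStepA as, ∀ x ∈ e, 0 ≤ x := by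
  induction line with
  | nil =>
    intro s as h
    rw [PySem.List.enumerate_nil]
    exact ⟨rfl, h⟩
  | cons f rest ih =>
    intro s as h
    have hcast : (s : Int) + 1 = ((s + 1 : Nat) : Int) := by push_cast; ring
    rw [PySem.List.enumerate_cons, List.foldl_cons, List.foldl_cons, hcast,
      pvStep_comm as s f h]
    exact ih (s + 1) (pvStepA as ((s : Int), f)) (pvStepA_nonneg as s f h)

theorem pvRows_comm (rows : List (List String)) : ∀ (as : List (List Int)),
    (∀ e ∈ as, ∀ x ∈ e, 0 ≤ x) →
    rows.foldl pvRowB (as.map pvM) = (rows.foldl pvRowA as).map pvM := by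
  induction rows with
  | nil => intro as _; rfl
  | cons line rest ih =>
    intro as h
    have h0 := pvRow_comm line 0 as h
    simp only [List.foldl_cons, pvRowA, pvRowB]
    rw [show ((0 : Int)) = ((0 : Nat) : Int) by norm_num] at h0 ⊢
    rw [h0.1]
    exact ih _ h0.2

-- A's first loop builds len(df[0]) empty columns
theorem pvInitA (n : Nat) :
    (PySem.List.pyRange 0 (n : Int) 1).foldl (fun acc _ => acc ++ [([] : List Int)]) []
      = List.replicate n [] := by
  rw [PySem.List.foldl_append_singleton_eq_map (fun _ => ([] : List Int))]
  simp [PySem.List.pyRange_zero_natCast, Function.comp_def, List.map_const']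

-- ===== VERDICT (by name: the statement is the Claim_ definition above) =====

theorem printwidth_get_width_list_spec : Claim_equal_printwidth_get_width_list := by
  intro df _ _
  unfold Spec_printwidth_get_width_list printwidth_get_width_list printwidth_get_width_list_alt
  simp only [pvInitA, PySem.List.pyRepeat_singleton, Int.toNat_natCast]
  rw [show List.replicate (PySem.List.pyGetD df 0 []).length (0 : Int)
      = (List.replicate (PySem.List.pyGetD df 0 []).length ([] : List Int)).map pvM by
    simp [pvM_nil]]
  rw [pvRows_comm df _ (by simp)]
  rfl
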